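-- pv_equiv track=rewrite | github.com/wjx-git/DepTriggerNER | conll_dataset.py | first_trigger
-- ===== SOURCE A (Python) =====
-- remove = ['ROOT', 'punct']
--
-- def first_trigger(entity, deprel):
--     first_stage = []
--     for ind in entity:
--         for dep in deprel:
--             if dep[0] not in remove:
--                 if dep[1]-1 == ind and dep[2]-1 not in entity:
--                     first_stage.append((dep[2]-1, dep[0]))
--                 if dep[2]-1 == ind and dep[1]-1 not in entity:
--                     first_stage.append((dep[1]-1, dep[0]))
--     return first_stage
-- ===== SOURCE B (Python) =====
-- remove = ['ROOT', 'punct']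
--
-- def first_trigger(entity, deprel):
--     # One pass over deprel builds an index: position -> adjacent (other_pos, relname)
--     # entries in deprel order; then one lookup per entity index.
--     ent = set(entity)
--     index = {}
--     for name, h, t in deprel:
--         if name not in remove:
--             index.setdefault(h - 1, []).append((t - 1, name))
--             index.setdefault(t - 1, []).append((h - 1, name))
--     out = []
--     for ind in entity:
--         for other, name in index.get(ind, []):
--             if other not in ent:
--                 out.append((other, name))
--     return out
-- ===== Notes on version B (the rewrite author's own statement) =====
-- stated objective: faster
-- what changed: Replaces the nested scan of deprel per entity index by a single pass that indexes deprel entries by their (head-1) and (tail-1) endpoints into a dict, with the entity as a set for membership; each entity index then just looks up its bucket.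
import Mathlib
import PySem

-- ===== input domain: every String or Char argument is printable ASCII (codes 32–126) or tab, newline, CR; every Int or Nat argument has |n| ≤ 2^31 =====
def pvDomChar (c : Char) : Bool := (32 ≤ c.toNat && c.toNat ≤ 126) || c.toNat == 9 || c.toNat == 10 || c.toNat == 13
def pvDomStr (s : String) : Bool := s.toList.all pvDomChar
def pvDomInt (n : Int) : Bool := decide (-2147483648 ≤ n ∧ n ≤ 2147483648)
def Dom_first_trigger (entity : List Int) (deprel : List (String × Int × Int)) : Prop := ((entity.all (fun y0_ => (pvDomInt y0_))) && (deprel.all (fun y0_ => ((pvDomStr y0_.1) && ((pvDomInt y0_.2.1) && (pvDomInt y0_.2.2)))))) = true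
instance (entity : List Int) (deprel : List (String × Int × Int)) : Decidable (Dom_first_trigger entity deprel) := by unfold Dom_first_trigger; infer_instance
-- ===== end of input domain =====

-- B replaces A's nested per-entity scan of deprel by a one-pass dict index of deprel
-- entries keyed by endpoint position (objective: faster, asymptotic).

-- module constant 'remove'
def removeList : List String := ["ROOT", "punct"]

-- ===== PORT A =====
-- Literal port of A: for each ind in entity, scan all of deprel, two conditional appends.
def first_trigger (entity : List Int) (deprel : List (String × Int × Int)) : List (Int × String) :=
  entity.foldl (fun first_stage ind =>
    deprel.foldl (fun first_stage dep =>
      if removeList.contains dep.1 then first_stage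
      else
        let first_stage :=
          if dep.2.1 - 1 = ind ∧ ¬ (dep.2.2 - 1) ∈ entity
          then first_stage ++ [(dep.2.2 - 1, dep.1)] else first_stage
        if dep.2.2 - 1 = ind ∧ ¬ (dep.2.1 - 1) ∈ entity
        then first_stage ++ [(dep.2.1 - 1, dep.1)] else first_stage)
      first_stage) []

-- ===== PORT B =====
-- Literal port of Source B: ent = set(entity); index built by setdefault/append (Dict.modify);
-- then per entity index a bucket lookup with a set-membership filter.
def first_trigger_alt (entity : List Int) (deprel : List (String × Int × Int)) : List (Int × String) :=
  let ent : PySem.Set Int := PySem.Set.ofList entity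
  let index : PySem.Dict Int (List (Int × String)) :=
    deprel.foldl (fun d dep =>
      if removeList.contains dep.1 then d
      else
        let d := d.modify (dep.2.1 - 1) [] (· ++ [(dep.2.2 - 1, dep.1)])
        d.modify (dep.2.2 - 1) [] (· ++ [(dep.2.1 - 1, dep.1)]))
      PySem.Dict.empty
  entity.foldl (fun out ind =>
    (index.getD ind []).foldl (fun out e =>
      if PySem.Set.contains ent e.1 then out else out ++ [e]) out) []

-- ===== PRECONDITION & SPEC =====
def Spec_first_trigger (entity : List Int) (deprel : List (String × Int × Int)) (out : List (Int × String)) : Prop := out = first_trigger_alt entity deprel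
instance (entity : List Int) (deprel : List (String × Int × Int)) (out : List (Int × String)) : Decidable (Spec_first_trigger entity deprel out) := by unfold Spec_first_trigger; infer_instance

-- ===== CLAIM (what is proved, stated in full; the proofs are below) =====
def Claim_equal_first_trigger : Prop := ∀ (entity : List Int) (deprel : List (String × Int × Int)), Dom_first_trigger entity deprel → Spec_first_trigger entity deprel (first_trigger entity deprel)

-- ===== LEMMAS AND PROOFS =====

-- the entries the index holds at position p, in deprel order
def entriesFor (deprel : List (String × Int × Int)) (p : Int) : List (Int × String) :=
  deprel.flatMap (fun dep =>
    if removeList.contains dep.1 then []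
    else (if dep.2.1 - 1 = p then [(dep.2.2 - 1, dep.1)] else []) ++
         (if dep.2.2 - 1 = p then [(dep.2.1 - 1, dep.1)] else []))

theorem entriesFor_cons (dep : String × Int × Int) (rest : List (String × Int × Int)) (p : Int) :
    entriesFor (dep :: rest) p =
      (if removeList.contains dep.1 then []
       else (if dep.2.1 - 1 = p then [(dep.2.2 - 1, dep.1)] else []) ++
            (if dep.2.2 - 1 = p then [(dep.2.1 - 1, dep.1)] else [])) ++ entriesFor rest p := rfl

theorem index_getD (deprel : List (String × Int × Int)) (d : PySem.Dict Int (List (Int × String))) (p : Int) :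
    (deprel.foldl (fun d dep =>
      if removeList.contains dep.1 then d
      else
        let d := d.modify (dep.2.1 - 1) [] (· ++ [(dep.2.2 - 1, dep.1)])
        d.modify (dep.2.2 - 1) [] (· ++ [(dep.2.1 - 1, dep.1)])) d).getD p []
    = d.getD p [] ++ entriesFor deprel p := by
  induction deprel generalizing d with
  | nil => simp [entriesFor]
  | cons dep rest ih =>
    rw [List.foldl_cons, entriesFor_cons]
    by_cases hr : removeList.contains dep.1 = true
    · rw [if_pos hr, if_pos hr, ih, List.nil_append]
    · rw [if_neg hr, if_neg hr, ih]
      show ((d.modify (dep.2.1 - 1) [] (· ++ [(dep.2.2 - 1, dep.1)])).modify (dep.2.2 - 1) []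
              (· ++ [(dep.2.1 - 1, dep.1)])).getD p [] ++ entriesFor rest p = _
      rw [PySem.Dict.getD_modify, PySem.Dict.getD_modify]
      by_cases h1 : dep.2.1 - 1 = p <;> by_cases h2 : dep.2.2 - 1 = p
      · simp [h1, h2]
      · simp [h1, h2, Ne.symm h2]
      · simp [h1, h2, Ne.symm h1]
      · simp [h1, h2, Ne.symm h1, Ne.symm h2, PySem.Dict.getD_modify]

theorem inner_A (entity : List Int) (deprel : List (String × Int × Int)) (ind : Int)
    (acc : List (Int × String)) :
    deprel.foldl (fun first_stage dep =>
      if removeList.contains dep.1 then first_stage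
      else
        let first_stage :=
          if dep.2.1 - 1 = ind ∧ ¬ (dep.2.2 - 1) ∈ entity
          then first_stage ++ [(dep.2.2 - 1, dep.1)] else first_stage
        if dep.2.2 - 1 = ind ∧ ¬ (dep.2.1 - 1) ∈ entity
        then first_stage ++ [(dep.2.1 - 1, dep.1)] else first_stage) acc
    = acc ++ (entriesFor deprel ind).filter (fun e => decide (¬ e.1 ∈ entity)) := by
  induction deprel generalizing acc with
  | nil => simp [entriesFor]
  | cons dep rest ih =>
    rw [List.foldl_cons, entriesFor_cons, List.filter_append, ← List.append_assoc]
    by_cases hr : removeList.contains dep.1 = true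
    · rw [if_pos hr, if_pos hr, ih, List.filter_nil, List.append_nil]
    · rw [if_neg hr, if_neg hr]
      show List.foldl _ _ rest = _
      rw [ih]
      congr 1
      by_cases h1 : dep.2.1 - 1 = ind <;> by_cases h2 : dep.2.2 - 1 = ind <;>
        by_cases m1 : (dep.2.1 - 1) ∈ entity <;> by_cases m2 : (dep.2.2 - 1) ∈ entity <;>
        simp_all

theorem inner_B (bucket : List (Int × String)) (ent : PySem.Set Int)
    (acc : List (Int × String)) :
    bucket.foldl (fun out e =>
      if PySem.Set.contains ent e.1 then out else out ++ [e]) acc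
    = acc ++ bucket.filter (fun e => ! PySem.Set.contains ent e.1) := by
  induction bucket generalizing acc with
  | nil => simp
  | cons e rest ih =>
    rw [List.foldl_cons, List.filter_cons]
    by_cases h : PySem.Set.contains ent e.1 = true
    · rw [if_pos h, h, ih]; simp
    · have h' : PySem.Set.contains ent e.1 = false := by
        revert h; cases PySem.Set.contains ent e.1 <;> simp
      rw [if_neg h, h', ih]; simp

-- ===== VERDICT (by name: the statement is the Claim_ definition above) =====
theorem first_trigger_spec : Claim_equal_first_trigger := by
  intro entity deprel _
  unfold Spec_first_trigger first_trigger first_trigger_alt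
  dsimp only
  apply Eq.symm
  apply PySem.List.foldl_congr_mem
  intro acc ind _
  rw [index_getD, PySem.Dict.getD_empty, List.nil_append, inner_B, inner_A]
  congr 1
  apply List.filter_congr
  intro e _
  simp [PySem.Set.contains, PySem.Set.mem_ofList]
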